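-- pv_equiv track=rewrite | github.com/Kirito0098/AdminAntizapret | core/services/openvpn_socket_reader.py | extract_status_payload_from_management
-- ===== SOURCE A (Python) =====
-- def extract_status_payload_from_management(raw):
--     lines = []
--     for raw_line in (raw or "").splitlines():
--         line = raw_line.strip("\r")
--         if not line:
--             continue
--         if (
--             line.startswith("TITLE,")
--             or line.startswith("TIME,")
--             or line.startswith("HEADER,")
--             or line.startswith("TITLE\t")
--             or line.startswith("TIME\t")
--             or line.startswith("HEADER\t")
--             or line.startswith("TITLE ")
--             or line.startswith("TIME ")
--             or line.startswith("HEADER ")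
--         ):
--             lines.append(line)
--             continue
--         if (
--             line.startswith("CLIENT_LIST,")
--             or line.startswith("ROUTING_TABLE,")
--             or line.startswith("GLOBAL_STATS,")
--             or line.startswith("CLIENT_LIST\t")
--             or line.startswith("ROUTING_TABLE\t")
--             or line.startswith("GLOBAL_STATS\t")
--             or line.startswith("CLIENT_LIST ")
--             or line.startswith("ROUTING_TABLE ")
--             or line.startswith("GLOBAL_STATS ")
--         ):
--             lines.append(line)
--             continue
--         if line == "END":
--             lines.append(line)
--
--     return "\n".join(lines)
-- ===== SOURCE B (Python) =====
-- KEYWORDS = {"TITLE", "TIME", "HEADER", "CLIENT_LIST", "ROUTING_TABLE", "GLOBAL_STATS"}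
-- DELIMS = ",\t "
--
-- def extract_status_payload_from_management(raw):
--     kept = []
--     for raw_line in (raw or "").splitlines():
--         line = raw_line.strip("\r")
--         if not line:
--             continue
--         i = 0
--         n = len(line)
--         while i < n and line[i] not in DELIMS:
--             i += 1
--         if (i < n and line[:i] in KEYWORDS) or line == "END":
--             kept.append(line)
--     return "\n".join(kept)
-- ===== Notes on version B (the rewrite author's own statement) =====
-- stated objective: alternative
-- what changed: B replaces A's 18-way startswith OR-chain by a single scan of each line for its first delimiter (',', tab or space) and a set lookup of the leading token among the six record keywords; the END line stays an exact-match case.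
import Mathlib
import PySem

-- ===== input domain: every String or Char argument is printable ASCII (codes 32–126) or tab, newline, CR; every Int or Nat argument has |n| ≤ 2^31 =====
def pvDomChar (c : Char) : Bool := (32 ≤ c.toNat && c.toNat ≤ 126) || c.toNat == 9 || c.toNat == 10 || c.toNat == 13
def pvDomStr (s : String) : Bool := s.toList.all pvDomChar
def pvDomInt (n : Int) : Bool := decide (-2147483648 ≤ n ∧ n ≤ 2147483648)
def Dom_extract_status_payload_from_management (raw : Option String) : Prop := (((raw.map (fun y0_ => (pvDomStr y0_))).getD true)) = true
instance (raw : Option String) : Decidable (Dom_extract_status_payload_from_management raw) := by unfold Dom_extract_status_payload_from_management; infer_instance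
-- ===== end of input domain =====

-- B replaces A's 18-way startswith OR-chain by scanning each line for its first delimiter
-- and looking the leading token up in a keyword set (objective: idiomatic/alternative).

-- ===== PORT A =====
def pvStepA (acc : List String) (raw_line : String) : List String :=
  let line := PySem.Str.stripChars raw_line "\r"
  if line == "" then acc
  else if (PySem.Str.startswith line "TITLE," || PySem.Str.startswith line "TIME," ||
           PySem.Str.startswith line "HEADER," || PySem.Str.startswith line "TITLE\t" ||
           PySem.Str.startswith line "TIME\t" || PySem.Str.startswith line "HEADER\t" ||
           PySem.Str.startswith line "TITLE " || PySem.Str.startswith line "TIME " ||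
           PySem.Str.startswith line "HEADER ") then acc ++ [line]
  else if (PySem.Str.startswith line "CLIENT_LIST," || PySem.Str.startswith line "ROUTING_TABLE," ||
           PySem.Str.startswith line "GLOBAL_STATS," || PySem.Str.startswith line "CLIENT_LIST\t" ||
           PySem.Str.startswith line "ROUTING_TABLE\t" || PySem.Str.startswith line "GLOBAL_STATS\t" ||
           PySem.Str.startswith line "CLIENT_LIST " || PySem.Str.startswith line "ROUTING_TABLE " ||
           PySem.Str.startswith line "GLOBAL_STATS ") then acc ++ [line]
  else if line == "END" then acc ++ [line]
  else acc

def extract_status_payload_from_management (raw : Option String) : String :=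
  PySem.Str.join "\n" ((PySem.Str.splitlines (raw.getD "")).foldl pvStepA [])

-- ===== PORT B =====
def pvKeywords : List (List Char) :=
  ["TITLE".toList, "TIME".toList, "HEADER".toList,
   "CLIENT_LIST".toList, "ROUTING_TABLE".toList, "GLOBAL_STATS".toList]

def pvIsDelim (c : Char) : Bool := c == ',' || c == '\t' || c == ' '

-- the `while i < n and line[i] not in DELIMS` scan: returns (line[:i], i < n)
def pvScan : List Char → List Char × Bool
  | [] => ([], false)
  | c :: rest =>
      if pvIsDelim c then ([], true)
      else
        let p := pvScan rest
        (c :: p.1, p.2)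

def pvStepB (acc : List String) (raw_line : String) : List String :=
  let line := PySem.Str.stripChars raw_line "\r"
  if line == "" then acc
  else
    let p := pvScan line.toList
    if (p.2 && pvKeywords.contains p.1) || line == "END" then acc ++ [line] else acc

def extract_status_payload_from_management_alt (raw : Option String) : String :=
  PySem.Str.join "\n" ((PySem.Str.splitlines (raw.getD "")).foldl pvStepB [])

-- ===== PRECONDITION & SPEC =====
def Spec_extract_status_payload_from_management (raw : Option String) (out : String) : Prop := out = extract_status_payload_from_management_alt raw
instance (raw : Option String) (out : String) : Decidable (Spec_extract_status_payload_from_management raw out) := by unfold Spec_extract_status_payload_from_management; infer_instance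

-- ===== CLAIM (what is proved, stated in full; the proofs are below) =====
def Claim_equal_extract_status_payload_from_management : Prop := ∀ (raw : Option String), Dom_extract_status_payload_from_management raw → Spec_extract_status_payload_from_management raw (extract_status_payload_from_management raw)

-- ===== LEMMAS AND PROOFS =====

lemma pvScan_eq (cs : List Char) :
    pvScan cs = (cs.takeWhile (fun c => !pvIsDelim c), cs.any pvIsDelim) := by
  induction cs with
  | nil => rfl
  | cons c rest ih =>
    cases h : pvIsDelim c <;> simp [pvScan, h, ih]

lemma tw_iff (K : List Char) (hK : K.all (fun c => !pvIsDelim c) = true) (cs : List Char) :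
    (cs.takeWhile (fun c => !pvIsDelim c) = K ∧ cs.any pvIsDelim = true) ↔
      ∃ d rest, pvIsDelim d = true ∧ cs = K ++ d :: rest := by
  induction K generalizing cs with
  | nil =>
    cases cs with
    | nil => simp
    | cons c cs' => cases h : pvIsDelim c <;> simp [h]
  | cons k K' ih =>
    rw [List.all_cons, Bool.and_eq_true, Bool.not_eq_true'] at hK
    obtain ⟨hk, hK'⟩ := hK
    cases cs with
    | nil => simp
    | cons c cs' =>
      cases h : pvIsDelim c with
      | true =>
        simp [h]
        intro x hx hck rest hcs
        simp [hck, hk] at h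
      | false =>
        simp only [List.takeWhile_cons, h, Bool.not_false, if_true, List.any_cons,
          Bool.false_or, List.cons_eq_cons, List.cons_append]
        constructor
        · rintro ⟨⟨hck, htw⟩, hany⟩
          obtain ⟨d, rest, hd, hcs⟩ := (ih hK' cs').1 ⟨htw, hany⟩
          exact ⟨d, rest, hd, hck, hcs⟩
        · rintro ⟨d, rest, hd, hck, hcs⟩
          have := (ih hK' cs').2 ⟨d, rest, hd, hcs⟩
          exact ⟨⟨hck, this.1⟩, this.2⟩

lemma kw_iff (K : List Char) (hK : K.all (fun c => !pvIsDelim c) = true) (cs : List Char) :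
    (PySem.Chars.startswith cs (K ++ [',']) = true ∨ PySem.Chars.startswith cs (K ++ ['\t']) = true ∨
     PySem.Chars.startswith cs (K ++ [' ']) = true) ↔
      (cs.takeWhile (fun c => !pvIsDelim c) = K ∧ cs.any pvIsDelim = true) := by
  rw [tw_iff K hK cs, PySem.Chars.startswith_iff, PySem.Chars.startswith_iff, PySem.Chars.startswith_iff]
  constructor
  · rintro (⟨rest, hr⟩ | ⟨rest, hr⟩ | ⟨rest, hr⟩)
    · exact ⟨',', rest, by decide, by rw [← hr]; simp⟩
    · exact ⟨'\t', rest, by decide, by rw [← hr]; simp⟩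
    · exact ⟨' ', rest, by decide, by rw [← hr]; simp⟩
  · rintro ⟨d, rest, hd, hcs⟩
    have hd' : d = ',' ∨ d = '\t' ∨ d = ' ' := by
      simp [pvIsDelim] at hd; tauto
    rcases hd' with h | h | h
    · exact Or.inl ⟨rest, by rw [hcs, h]; simp⟩
    · exact Or.inr (Or.inl ⟨rest, by rw [hcs, h]; simp⟩)
    · exact Or.inr (Or.inr ⟨rest, by rw [hcs, h]; simp⟩)

set_option maxRecDepth 8192 in
set_option maxHeartbeats 1000000 in
lemma cond_eq (cs : List Char) :
    ((PySem.Chars.startswith cs "TITLE,".toList || PySem.Chars.startswith cs "TIME,".toList ||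
      PySem.Chars.startswith cs "HEADER,".toList || PySem.Chars.startswith cs "TITLE\t".toList ||
      PySem.Chars.startswith cs "TIME\t".toList || PySem.Chars.startswith cs "HEADER\t".toList ||
      PySem.Chars.startswith cs "TITLE ".toList || PySem.Chars.startswith cs "TIME ".toList ||
      PySem.Chars.startswith cs "HEADER ".toList) ||
     (PySem.Chars.startswith cs "CLIENT_LIST,".toList || PySem.Chars.startswith cs "ROUTING_TABLE,".toList ||
      PySem.Chars.startswith cs "GLOBAL_STATS,".toList || PySem.Chars.startswith cs "CLIENT_LIST\t".toList ||
      PySem.Chars.startswith cs "ROUTING_TABLE\t".toList || PySem.Chars.startswith cs "GLOBAL_STATS\t".toList ||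
      PySem.Chars.startswith cs "CLIENT_LIST ".toList || PySem.Chars.startswith cs "ROUTING_TABLE ".toList ||
      PySem.Chars.startswith cs "GLOBAL_STATS ".toList))
    = ((pvScan cs).2 && pvKeywords.contains (pvScan cs).1) := by
  have e1 : "TITLE,".toList = "TITLE".toList ++ [','] := by decide
  have e2 : "TIME,".toList = "TIME".toList ++ [','] := by decide
  have e3 : "HEADER,".toList = "HEADER".toList ++ [','] := by decide
  have e4 : "TITLE\t".toList = "TITLE".toList ++ ['\t'] := by decide
  have e5 : "TIME\t".toList = "TIME".toList ++ ['\t'] := by decide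
  have e6 : "HEADER\t".toList = "HEADER".toList ++ ['\t'] := by decide
  have e7 : "TITLE ".toList = "TITLE".toList ++ [' '] := by decide
  have e8 : "TIME ".toList = "TIME".toList ++ [' '] := by decide
  have e9 : "HEADER ".toList = "HEADER".toList ++ [' '] := by decide
  have f1 : "CLIENT_LIST,".toList = "CLIENT_LIST".toList ++ [','] := by decide
  have f2 : "ROUTING_TABLE,".toList = "ROUTING_TABLE".toList ++ [','] := by decide
  have f3 : "GLOBAL_STATS,".toList = "GLOBAL_STATS".toList ++ [','] := by decide
  have f4 : "CLIENT_LIST\t".toList = "CLIENT_LIST".toList ++ ['\t'] := by decide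
  have f5 : "ROUTING_TABLE\t".toList = "ROUTING_TABLE".toList ++ ['\t'] := by decide
  have f6 : "GLOBAL_STATS\t".toList = "GLOBAL_STATS".toList ++ ['\t'] := by decide
  have f7 : "CLIENT_LIST ".toList = "CLIENT_LIST".toList ++ [' '] := by decide
  have f8 : "ROUTING_TABLE ".toList = "ROUTING_TABLE".toList ++ [' '] := by decide
  have f9 : "GLOBAL_STATS ".toList = "GLOBAL_STATS".toList ++ [' '] := by decide
  have h1 := kw_iff "TITLE".toList (by decide) cs
  have h2 := kw_iff "TIME".toList (by decide) cs
  have h3 := kw_iff "HEADER".toList (by decide) cs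
  have h4 := kw_iff "CLIENT_LIST".toList (by decide) cs
  have h5 := kw_iff "ROUTING_TABLE".toList (by decide) cs
  have h6 := kw_iff "GLOBAL_STATS".toList (by decide) cs
  rw [pvScan_eq, Bool.eq_iff_iff]
  simp only [Bool.or_eq_true, Bool.and_eq_true, pvKeywords, List.contains_cons,
    List.contains_nil, beq_iff_eq, Bool.or_false,
    e1, e2, e3, e4, e5, e6, e7, e8, e9, f1, f2, f3, f4, f5, f6, f7, f8, f9]
  simp only [or_assoc]
  constructor
  · rintro (hs|hs|hs|hs|hs|hs|hs|hs|hs|hs|hs|hs|hs|hs|hs|hs|hs|hs)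
    · have p := h1.mp (Or.inl hs); exact ⟨p.2, Or.inl p.1⟩
    · have p := h2.mp (Or.inl hs); exact ⟨p.2, Or.inr (Or.inl p.1)⟩
    · have p := h3.mp (Or.inl hs); exact ⟨p.2, Or.inr (Or.inr (Or.inl p.1))⟩
    · have p := h1.mp (Or.inr (Or.inl hs)); exact ⟨p.2, Or.inl p.1⟩
    · have p := h2.mp (Or.inr (Or.inl hs)); exact ⟨p.2, Or.inr (Or.inl p.1)⟩
    · have p := h3.mp (Or.inr (Or.inl hs)); exact ⟨p.2, Or.inr (Or.inr (Or.inl p.1))⟩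
    · have p := h1.mp (Or.inr (Or.inr hs)); exact ⟨p.2, Or.inl p.1⟩
    · have p := h2.mp (Or.inr (Or.inr hs)); exact ⟨p.2, Or.inr (Or.inl p.1)⟩
    · have p := h3.mp (Or.inr (Or.inr hs)); exact ⟨p.2, Or.inr (Or.inr (Or.inl p.1))⟩
    · have p := h4.mp (Or.inl hs); exact ⟨p.2, Or.inr (Or.inr (Or.inr (Or.inl p.1)))⟩
    · have p := h5.mp (Or.inl hs); exact ⟨p.2, Or.inr (Or.inr (Or.inr (Or.inr (Or.inl p.1))))⟩
    · have p := h6.mp (Or.inl hs); exact ⟨p.2, Or.inr (Or.inr (Or.inr (Or.inr (Or.inr (p.1)))))⟩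
    · have p := h4.mp (Or.inr (Or.inl hs)); exact ⟨p.2, Or.inr (Or.inr (Or.inr (Or.inl p.1)))⟩
    · have p := h5.mp (Or.inr (Or.inl hs)); exact ⟨p.2, Or.inr (Or.inr (Or.inr (Or.inr (Or.inl p.1))))⟩
    · have p := h6.mp (Or.inr (Or.inl hs)); exact ⟨p.2, Or.inr (Or.inr (Or.inr (Or.inr (Or.inr (p.1)))))⟩
    · have p := h4.mp (Or.inr (Or.inr hs)); exact ⟨p.2, Or.inr (Or.inr (Or.inr (Or.inl p.1)))⟩
    · have p := h5.mp (Or.inr (Or.inr hs)); exact ⟨p.2, Or.inr (Or.inr (Or.inr (Or.inr (Or.inl p.1))))⟩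
    · have p := h6.mp (Or.inr (Or.inr hs)); exact ⟨p.2, Or.inr (Or.inr (Or.inr (Or.inr (Or.inr (p.1)))))⟩
  · rintro ⟨hany, (htw|htw|htw|htw|htw|htw)⟩
    · rcases h1.mpr ⟨htw, hany⟩ with hs|hs|hs
      · exact Or.inl hs
      · exact Or.inr (Or.inr (Or.inr (Or.inl hs)))
      · exact Or.inr (Or.inr (Or.inr (Or.inr (Or.inr (Or.inr (Or.inl hs))))))
    · rcases h2.mpr ⟨htw, hany⟩ with hs|hs|hs
      · exact Or.inr (Or.inl hs)
      · exact Or.inr (Or.inr (Or.inr (Or.inr (Or.inl hs))))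
      · exact Or.inr (Or.inr (Or.inr (Or.inr (Or.inr (Or.inr (Or.inr (Or.inl hs)))))))
    · rcases h3.mpr ⟨htw, hany⟩ with hs|hs|hs
      · exact Or.inr (Or.inr (Or.inl hs))
      · exact Or.inr (Or.inr (Or.inr (Or.inr (Or.inr (Or.inl hs)))))
      · exact Or.inr (Or.inr (Or.inr (Or.inr (Or.inr (Or.inr (Or.inr (Or.inr (Or.inl hs))))))))
    · rcases h4.mpr ⟨htw, hany⟩ with hs|hs|hs
      · exact Or.inr (Or.inr (Or.inr (Or.inr (Or.inr (Or.inr (Or.inr (Or.inr (Or.inr (Or.inl hs)))))))))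
      · exact Or.inr (Or.inr (Or.inr (Or.inr (Or.inr (Or.inr (Or.inr (Or.inr (Or.inr (Or.inr (Or.inr (Or.inr (Or.inl hs))))))))))))
      · exact Or.inr (Or.inr (Or.inr (Or.inr (Or.inr (Or.inr (Or.inr (Or.inr (Or.inr (Or.inr (Or.inr (Or.inr (Or.inr (Or.inr (Or.inr (Or.inl hs)))))))))))))))
    · rcases h5.mpr ⟨htw, hany⟩ with hs|hs|hs
      · exact Or.inr (Or.inr (Or.inr (Or.inr (Or.inr (Or.inr (Or.inr (Or.inr (Or.inr (Or.inr (Or.inl hs))))))))))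
      · exact Or.inr (Or.inr (Or.inr (Or.inr (Or.inr (Or.inr (Or.inr (Or.inr (Or.inr (Or.inr (Or.inr (Or.inr (Or.inr (Or.inl hs)))))))))))))
      · exact Or.inr (Or.inr (Or.inr (Or.inr (Or.inr (Or.inr (Or.inr (Or.inr (Or.inr (Or.inr (Or.inr (Or.inr (Or.inr (Or.inr (Or.inr (Or.inr (Or.inl hs))))))))))))))))
    · rcases h6.mpr ⟨htw, hany⟩ with hs|hs|hs
      · exact Or.inr (Or.inr (Or.inr (Or.inr (Or.inr (Or.inr (Or.inr (Or.inr (Or.inr (Or.inr (Or.inr (Or.inl hs)))))))))))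
      · exact Or.inr (Or.inr (Or.inr (Or.inr (Or.inr (Or.inr (Or.inr (Or.inr (Or.inr (Or.inr (Or.inr (Or.inr (Or.inr (Or.inr (Or.inl hs))))))))))))))
      · exact Or.inr (Or.inr (Or.inr (Or.inr (Or.inr (Or.inr (Or.inr (Or.inr (Or.inr (Or.inr (Or.inr (Or.inr (Or.inr (Or.inr (Or.inr (Or.inr (Or.inr (hs)))))))))))))))))

lemma if_chain3 {α : Type} (b1 b2 b3 : Bool) (x y : α) :
    (if b1 then x else if b2 then x else if b3 then x else y)
      = (if (b1 || b2 || b3) then x else y) := by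
  cases b1 <;> cases b2 <;> cases b3 <;> simp

lemma step_eq (acc : List String) (l : String) : pvStepA acc l = pvStepB acc l := by
  simp only [pvStepA, pvStepB]
  by_cases h : (PySem.Str.stripChars l "\r") == ""
  · simp [h]
  · simp only [h, Bool.false_eq_true, if_false]
    rw [if_chain3]
    have hc := cond_eq (PySem.Str.stripChars l "\r").toList
    simp only [PySem.Str.startswith_eq]
    simp only [hc]

-- ===== VERDICT (by name: the statement is the Claim_ definition above) =====
theorem extract_status_payload_from_management_spec : Claim_equal_extract_status_payload_from_management := by
  intro raw _
  unfold Spec_extract_status_payload_from_management extract_status_payload_from_management extract_status_payload_from_management_alt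
  rw [show pvStepA = pvStepB from funext fun a => funext fun l => step_eq a l]
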